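-- pv_equiv track=rewrite | github.com/Hellen-2424/IBI1_2024-25 | group_project/ibiicaAI.py | most_frequent_trinucleotide
-- ===== SOURCE A (Python) =====
-- from collections import Counter
--
-- def most_frequent_trinucleotide(mrna_sequence):
--     """
--     Input: mRNA sequence (string)
--     Output: The most frequent trinucleotide and its count
--     Assumption: The sequence starts with the start codon 'AUG' and contains a stop codon
--     """
--     # List of stop codons
--     stop_codons = ['UAA', 'UAG', 'UGA']
--
--     # Ensure the sequence starts with 'AUG'
--     if not mrna_sequence.startswith('AUG'):
--         return "Sequence must start with 'AUG'", 0
--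
--     # Find the position of the first stop codon
--     end_pos = len(mrna_sequence)
--     for i in range(0, len(mrna_sequence) - 2, 3):
--         codon = mrna_sequence[i:i+3]
--         if codon in stop_codons:
--             end_pos = i
--             break
--
--     # Extract the coding region (from AUG to before the stop codon)
--     coding_sequence = mrna_sequence[0:end_pos]
--
--     # Count the frequency of all trinucleotides
--     trinucleotides = [coding_sequence[i:i+3] for i in range(0, len(coding_sequence), 3)]
--     if not trinucleotides:
--         return "No valid trinucleotides", 0
--
--     # Use Counter to find the most frequent trinucleotide
--     trinucleotide_counts = Counter(trinucleotides)
--     most_common = trinucleotide_counts.most_common(1)[0]  # Get the most frequent trinucleotide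
--
--     return most_common[0], most_common[1]
-- ===== SOURCE B (Python) =====
-- def most_frequent_trinucleotide(mrna_sequence):
--     """Different decomposition: a while loop chomps the string codon by codon
--     (no index arithmetic, no separate stop-search/re-split passes, no Counter),
--     then the winner is picked with max(key=list.count)."""
--     if not mrna_sequence.startswith('AUG'):
--         return "Sequence must start with 'AUG'", 0
--     codons = []
--     rest = mrna_sequence
--     while rest and rest[:3] not in ('UAA', 'UAG', 'UGA'):
--         codons.append(rest[:3])
--         rest = rest[3:]
--     if not codons:
--         return "No valid trinucleotides", 0
--     best = max(codons, key=codons.count)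
--     return best, codons.count(best)
-- ===== Notes on version B (the rewrite author's own statement) =====
-- stated objective: alternative
-- what changed: Replaces A's three staged passes (index loop searching for the stop codon, re-split comprehension, Counter + most_common) by a while loop that chomps the string codon by codon into a list and a final max(codons, key=codons.count) argmax.
import Mathlib
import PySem

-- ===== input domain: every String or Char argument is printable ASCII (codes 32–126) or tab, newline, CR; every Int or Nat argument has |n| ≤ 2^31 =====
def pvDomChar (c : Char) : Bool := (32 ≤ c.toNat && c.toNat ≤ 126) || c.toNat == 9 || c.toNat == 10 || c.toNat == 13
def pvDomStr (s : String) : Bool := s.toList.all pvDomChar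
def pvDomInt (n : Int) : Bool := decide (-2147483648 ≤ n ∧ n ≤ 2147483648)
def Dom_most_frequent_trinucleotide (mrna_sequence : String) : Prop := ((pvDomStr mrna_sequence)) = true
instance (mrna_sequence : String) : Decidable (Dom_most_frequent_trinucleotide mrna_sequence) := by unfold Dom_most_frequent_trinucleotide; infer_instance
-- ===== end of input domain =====

-- B replaces A's three staged passes (index loop hunting the stop codon, re-split
-- comprehension, Counter) by a while loop that chomps the string codon by codon and a
-- final max(key=list.count) — a different decomposition of the same O-cost task.

-- ===== PORT A =====
-- the stop_codons list
def pvStops : List (List Char) := ["UAA".toList, "UAG".toList, "UGA".toList]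

-- A's stop-finding loop: 'for i in range(…): codon = seq[i:i+3]; if codon in stop_codons: end_pos = i; break'
def pvFindStopA (cs : List Char) : List Int → Int → Int
  | [], e => e
  | i :: rest, e =>
      if pvStops.contains (PySem.List.slice cs (some i) (some (i + 3))) then i
      else pvFindStopA cs rest e

def most_frequent_trinucleotide (mrna_sequence : String) : String × Int :=
  let cs := mrna_sequence.toList
  if ¬ (PySem.Chars.startswith cs "AUG".toList) then ("Sequence must start with 'AUG'", 0)
  else
    let end_pos := pvFindStopA cs
      (PySem.List.pyRange 0 (PySem.List.len cs - 2) 3) (PySem.List.len cs)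
    let coding := PySem.List.slice cs (some 0) (some end_pos)
    let trins := (PySem.List.pyRange 0 (PySem.List.len coding) 3).map
      (fun i => PySem.List.slice coding (some i) (some (i + 3)))
    if trins = [] then ("No valid trinucleotides", 0)
    else
      let counts := PySem.Dict.counter trins
      -- most_common(1)[0]: the first insertion-order key of maximal count; guarded, so never none
      match PySem.List.max? counts.items (fun p => p.2) with
      | some p => (String.ofList p.1, p.2)
      | none => ("", 0)

-- ===== PORT B =====
-- B's stop_codons tuple
def pvStopsB : List (List Char) := ["UAA".toList, "UAG".toList, "UGA".toList]

-- B's while loop: 'while rest and rest[:3] not in stops: codons.append(rest[:3]); rest = rest[3:]'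
def pvWhileB (rest : List Char) : List (List Char) :=
  if h : rest = [] then []
  else if pvStopsB.contains (PySem.List.slice rest none (some 3)) then []
  else PySem.List.slice rest none (some 3) :: pvWhileB (PySem.List.slice rest (some 3) none)
termination_by rest.length
decreasing_by
  rw [PySem.List.slice_from rest (by norm_num : (0:Int) ≤ 3)]
  simp only [List.length_drop]
  have : 0 < rest.length := List.length_pos_iff.mpr h
  omega

def most_frequent_trinucleotide_alt (mrna_sequence : String) : String × Int :=
  if ¬ (PySem.Chars.startswith mrna_sequence.toList "AUG".toList) then
    ("Sequence must start with 'AUG'", 0)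
  else
    let codons := pvWhileB mrna_sequence.toList
    if codons = [] then ("No valid trinucleotides", 0)
    else
      -- best = max(codons, key=codons.count); return best, codons.count(best)
      match PySem.List.max? codons (fun c => (PySem.List.count codons c : Int)) with
      | some best => (String.ofList best, (PySem.List.count codons best : Int))
      | none => ("", 0)

-- ===== PRECONDITION & SPEC =====
def Spec_most_frequent_trinucleotide (mrna_sequence : String) (out : String × Int) : Prop := out = most_frequent_trinucleotide_alt mrna_sequence
instance (mrna_sequence : String) (out : String × Int) : Decidable (Spec_most_frequent_trinucleotide mrna_sequence out) := by unfold Spec_most_frequent_trinucleotide; infer_instance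

-- ===== CLAIM (what is proved, stated in full; the proofs are below) =====
def Claim_equal_most_frequent_trinucleotide : Prop := ∀ (mrna_sequence : String), Dom_most_frequent_trinucleotide mrna_sequence → Spec_most_frequent_trinucleotide mrna_sequence (most_frequent_trinucleotide mrna_sequence)

-- ===== LEMMAS AND PROOFS =====

-- take/drop form of B's while loop
theorem pvWhileB_eq (cs : List Char) :
    pvWhileB cs =
      if cs = [] then []
      else if pvStops.contains (cs.take 3) then []
      else cs.take 3 :: pvWhileB (cs.drop 3) := by
  rw [pvWhileB]
  by_cases h : cs = []
  · simp [h]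
  · rw [dif_neg h, if_neg h,
        PySem.List.slice_to cs (by norm_num : (0:Int) ≤ 3),
        PySem.List.slice_from cs (by norm_num : (0:Int) ≤ 3)]
    rfl

-- pyRange with step 3: cons form
theorem pvRange3_cons (b : Int) (hb : 0 < b) :
    PySem.List.pyRange 0 b 3 = 0 :: (PySem.List.pyRange 0 (b - 3) 3).map (· + 3) := by
  rw [PySem.List.pyRange_of_pos 0 b (by norm_num),
      PySem.List.pyRange_of_pos 0 (b - 3) (by norm_num)]
  rw [show b - 0 + 3 - 1 = b + 2 by ring, show b - 3 - 0 + 3 - 1 = b - 1 by ring]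
  by_cases h3 : 3 < b
  · have h2 : (0:Int) < b - 3 := by omega
    simp only [if_pos hb, if_pos h2]
    have hstep : ((b + 2) / 3).toNat = ((b - 1) / 3).toNat + 1 := by omega
    rw [hstep, List.range_succ_eq_map]
    simp only [List.map_cons, List.map_map]
    refine congrArg₂ _ (by norm_num) (List.map_congr_left fun k _ => ?_)
    simp only [Function.comp_apply]
    push_cast
    ring
  · -- 0 < b ≤ 3 : singleton on the left, empty on the right
    have h2 : ¬ ((0:Int) < b - 3) := by omega
    simp only [if_pos hb, if_neg h2]
    have h1 : ((b + 2) / 3).toNat = 1 := by omega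
    rw [h1]
    simp

theorem pvRange3_nil (b : Int) (hb : b ≤ 0) : PySem.List.pyRange 0 b 3 = [] := by
  rw [PySem.List.pyRange_of_pos 0 b (by norm_num)]
  simp [show ¬ ((0:Int) < b) by omega]

-- members of a step-3 range from 0 are nonnegative
theorem pvRange3_nonneg {b i : Int} (h : i ∈ PySem.List.pyRange 0 b 3) : 0 ≤ i := by
  have := (PySem.List.mem_pyRange_iff_of_pos (by norm_num : (0:Int) < 3) i).mp h
  omega

-- shifting a slice by 3
theorem pvSlice_shift (cs : List Char) (i : Int) (hi : 0 ≤ i) :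
    PySem.List.slice cs (some (i + 3)) (some (i + 3 + 3)) =
      PySem.List.slice (cs.drop 3) (some i) (some (i + 3)) := by
  rw [PySem.List.slice_toNat, PySem.List.slice_toNat, List.drop_drop,
      show (i + 3 + 3).toNat = i.toNat + 6 by omega, show (i + 3).toNat = i.toNat + 3 by omega]
  · rw [show i.toNat + 6 - (i.toNat + 3) = 3 by omega, show 3 + i.toNat = i.toNat + 3 by omega, show i.toNat + 3 - i.toNat = 3 by omega]
  all_goals omega

theorem pv_take3_not_stop {cs : List Char} (h : cs.length < 3) :
    pvStops.contains (cs.take 3) = false := by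
  have htake : cs.take 3 = cs := List.take_of_length_le (by omega)
  rw [htake]
  simp only [pvStops, List.contains_eq_mem, List.mem_cons, List.not_mem_nil, or_false,
    decide_eq_false_iff_not]
  rintro (rfl | rfl | rfl) <;> simp at h

-- the first slice of a list: cs[0:3] = take 3
theorem pvSlice_zero_three (cs : List Char) :
    PySem.List.slice cs (some 0) (some (0 + 3)) = cs.take 3 := by
  rw [PySem.List.slice_toNat]
  · norm_num
    omega
  · norm_num
  · norm_num

-- shifting A's stop-finding loop by one codon
theorem pvFindStopA_shift (cs : List Char) (idxs : List Int) (h : ∀ i ∈ idxs, 0 ≤ i) (e : Int) :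
    pvFindStopA cs (idxs.map (· + 3)) e = 3 + pvFindStopA (cs.drop 3) idxs (e - 3) := by
  induction idxs with
  | nil => simp [pvFindStopA]
  | cons i rest ih =>
      simp only [List.map_cons, pvFindStopA]
      rw [pvSlice_shift cs i (h i (by simp))]
      split_ifs
      · ring
      · exact ih (fun j hj => h j (by simp [hj]))

-- the loop's result is a scanned index or the default
theorem pvFindStopA_mem_or (cs : List Char) (idxs : List Int) (e : Int) :
    pvFindStopA cs idxs e ∈ idxs ∨ pvFindStopA cs idxs e = e := by
  induction idxs with
  | nil => right; rfl
  | cons i rest ih =>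
      simp only [pvFindStopA]
      split_ifs
      · left; simp
      · rcases ih with hm | he
        · left; simp [hm]
        · right; exact he

-- A's pipeline (find stop, slice, re-split) produces B's chomped codon list
theorem pvA_eq_chomp (n : Nat) (cs : List Char) (hn : cs.length ≤ n) :
    ((PySem.List.pyRange 0
        (PySem.List.len (PySem.List.slice cs (some 0)
          (some (pvFindStopA cs (PySem.List.pyRange 0 (PySem.List.len cs - 2) 3)
            (PySem.List.len cs))))) 3).map
      (fun i => PySem.List.slice
        (PySem.List.slice cs (some 0)
          (some (pvFindStopA cs (PySem.List.pyRange 0 (PySem.List.len cs - 2) 3)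
            (PySem.List.len cs)))) (some i) (some (i + 3))))
    = pvWhileB cs := by
  induction n generalizing cs with
  | zero =>
      have hcs : cs = [] := by cases cs <;> simp_all
      subst hcs
      rw [pvWhileB_eq]
      simp [pvRange3_nil, pvFindStopA]
  | succ n ih =>
      by_cases hsmall : cs.length < 3
      · -- the search range is empty, coding = cs, at most one (partial, non-stop) codon
        simp only [PySem.List.len_eq]
        rw [pvRange3_nil ((cs.length : Int) - 2) (by omega)]
        simp only [pvFindStopA]
        have hcod : PySem.List.slice cs (some 0) (some ((cs.length : Int))) = cs := by
          rw [PySem.List.slice_toNat]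
          · simp
          · norm_num
          · positivity
        rw [hcod]
        by_cases hnil : cs = []
        · subst hnil
          rw [pvWhileB_eq]
          simp [pvRange3_nil]
        · have hpos : 0 < cs.length := List.length_pos_iff.mpr hnil
          have htake : cs.take 3 = cs := List.take_of_length_le (by omega)
          rw [pvRange3_cons _ (by exact_mod_cast hpos),
              pvRange3_nil ((cs.length : Int) - 3) (by omega)]
          rw [pvWhileB_eq, if_neg hnil,
              if_neg (by rw [pv_take3_not_stop hsmall]; simp)]
          rw [pvWhileB_eq (cs.drop 3), if_pos (List.drop_eq_nil_of_le (by omega : cs.length ≤ 3))]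
          simp only [List.map_cons, List.map_nil, pvSlice_zero_three, htake]
      · -- cs has a full first codon
        rw [Nat.not_lt] at hsmall
        have hne : cs ≠ [] := by intro h; rw [h] at hsmall; simp at hsmall
        simp only [PySem.List.len_eq]
        rw [pvRange3_cons ((cs.length : Int) - 2) (by omega)]
        simp only [pvFindStopA, pvSlice_zero_three]
        by_cases hstop : pvStops.contains (cs.take 3) = true
        · rw [if_pos hstop]
          have hc0 : PySem.List.slice cs (some 0) (some 0) = [] := by
            rw [PySem.List.slice_toNat] <;> simp
          rw [hc0, pvWhileB_eq, if_neg hne, if_pos hstop]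
          simp [pvRange3_nil]
        · rw [if_neg hstop]
          rw [pvFindStopA_shift cs _ (fun j hj => pvRange3_nonneg hj)]
          have hlen' : (cs.drop 3).length = cs.length - 3 := by simp
          have hr2 : (cs.length : Int) - 2 - 3 = ((cs.drop 3).length : Int) - 2 := by
            rw [hlen', Nat.cast_sub (by omega)]; push_cast; ring
          have hr3 : (cs.length : Int) - 3 = ((cs.drop 3).length : Int) := by
            rw [hlen', Nat.cast_sub (by omega)]; push_cast; ring
          rw [hr2, hr3]
          set E := pvFindStopA (cs.drop 3)
            (PySem.List.pyRange 0 (((cs.drop 3).length : Int) - 2) 3)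
            ((cs.drop 3).length : Int) with hE
          have hEbounds : 0 ≤ E ∧ E ≤ ((cs.drop 3).length : Int) := by
            rcases pvFindStopA_mem_or (cs.drop 3)
              (PySem.List.pyRange 0 (((cs.drop 3).length : Int) - 2) 3)
              ((cs.drop 3).length : Int) with hm | heq
            · have := (PySem.List.mem_pyRange_iff_of_pos (by norm_num : (0:Int) < 3) _).mp hm
              rw [← hE] at this
              constructor <;> omega
            · rw [← hE] at heq  -- E = default
              rw [heq]
              exact ⟨by positivity, le_rfl⟩
          have hEle : E.toNat ≤ cs.length - 3 := by
            have := hEbounds.2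
            rw [hlen'] at this
            omega
          have hcod : PySem.List.slice cs (some 0) (some (3 + E)) = cs.take (3 + E.toNat) := by
            rw [PySem.List.slice_toNat]
            · simp only [Int.toNat_zero, List.drop_zero, Nat.sub_zero]
              congr 1
              omega
            · norm_num
            · omega
          rw [hcod]
          have hlcod : (cs.take (3 + E.toNat)).length = 3 + E.toNat := by
            simp [List.length_take]
            omega
          rw [hlcod, pvRange3_cons ((3 + E.toNat : Nat) : Int) (by positivity),
              show (((3 + E.toNat : Nat) : Int) - 3) = ((E.toNat : Nat) : Int) by push_cast; ring]
          simp only [List.map_cons, List.map_map]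
          rw [pvWhileB_eq, if_neg hne, if_neg hstop]
          congr 1
          · -- head codon
            rw [pvSlice_zero_three, List.take_take]
            congr 1
            omega
          · -- tail codons: shift then the induction hypothesis
            have hcongr : ∀ j ∈ PySem.List.pyRange 0 ((E.toNat : Nat) : Int) 3,
                PySem.List.slice (cs.take (3 + E.toNat)) (some (j + 3)) (some (j + 3 + 3)) =
                PySem.List.slice ((cs.drop 3).take E.toNat) (some j) (some (j + 3)) := by
              intro j hj
              rw [pvSlice_shift _ j (pvRange3_nonneg hj), List.drop_take]
              congr 2
              omega
            have IH' := ih (cs.drop 3) (by rw [hlen']; omega)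
            simp only [PySem.List.len_eq, ← hE] at IH'
            have hcod' : PySem.List.slice (cs.drop 3) (some 0) (some E) =
                (cs.drop 3).take E.toNat := by
              rw [PySem.List.slice_toNat]
              · simp
              · norm_num
              · exact hEbounds.1
            rw [hcod'] at IH'
            have hlcod' : ((cs.drop 3).take E.toNat).length = E.toNat := by
              simp [List.length_take]
              omega
            rw [hlcod'] at IH'
            calc List.map
                  ((fun i => PySem.List.slice (cs.take (3 + E.toNat)) (some i) (some (i + 3))) ∘
                    (· + 3))
                  (PySem.List.pyRange 0 ((E.toNat : Nat) : Int) 3)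
                = List.map (fun j => PySem.List.slice ((cs.drop 3).take E.toNat) (some j) (some (j + 3)))
                  (PySem.List.pyRange 0 ((E.toNat : Nat) : Int) 3) :=
                  List.map_congr_left (fun j hj => hcongr j hj)
              _ = pvWhileB (cs.drop 3) := IH'

-- ===== the argmax bridge: max? over Counter items vs max? by list.count =====

-- the running-argmax step of PySem.List.max?
def pvStep {α : Type} (f : α → Int) (acc : Option α) (x : α) : Option α :=
  match acc with
  | none => some x
  | some m => if f m < f x then some x else some m

theorem pvMax?_eq_foldl {α : Type} (xs : List α) (f : α → Int) :
    PySem.List.max? xs f = List.foldl (pvStep f) none xs := rfl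

theorem pvStep_some {α : Type} (f : α → Int) (m x : α) :
    pvStep f (some m) x = some (if f m < f x then x else m) := by
  simp only [pvStep]
  split_ifs <;> rfl

-- a dominated element may be dropped from the scan
theorem pvSkip {α : Type} [BEq α] [LawfulBEq α] (f : α → Int) (x : α) :
    ∀ (l : List α) (m : α), f x ≤ f m →
      List.foldl (pvStep f) (some m) (l.filter (fun y => !(y == x))) =
        List.foldl (pvStep f) (some m) l := by
  intro l
  induction l with
  | nil => intro m _; rfl
  | cons y t ih =>
      intro m hxm
      by_cases hyx : (y == x) = true
      · have hy : y = x := eq_of_beq hyx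
        rw [List.filter_cons, if_neg (by simp [hyx])]
        rw [List.foldl_cons, hy, pvStep_some, if_neg (by omega)]
        exact ih m hxm
      · rw [List.filter_cons, if_pos (by simp [hyx])]
        rw [List.foldl_cons, List.foldl_cons, pvStep_some]
        refine ih _ ?_
        split_ifs with h
        · omega
        · exact hxm

-- peeling one element off Set.ofList
theorem pvFoldl_add_cons {α : Type} [BEq α] [LawfulBEq α] :
    ∀ (l : List α) (a : α) (s : List α),
      List.foldl PySem.Set.add (a :: s) l =
        a :: List.foldl PySem.Set.add s (l.filter (fun z => !(z == a))) := by
  intro l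
  induction l with
  | nil => intro a s; rfl
  | cons z t ih =>
      intro a s
      by_cases hza : (z == a) = true
      · have hz : z = a := eq_of_beq hza
        rw [List.filter_cons, if_neg (by simp [hza])]
        rw [List.foldl_cons,
            show PySem.Set.add (a :: s) z = a :: s by
              simp [PySem.Set.add, PySem.Set.contains, hz]]
        exact ih a s
      · rw [List.filter_cons, if_pos (by simp [hza])]
        rw [List.foldl_cons, List.foldl_cons,
            show PySem.Set.add (a :: s) z = a :: PySem.Set.add s z by
              have hza0 : (z == a) = false := by simpa using hza
              simp only [PySem.Set.add, PySem.Set.contains, List.contains_cons, hza0,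
                Bool.false_or]
              split_ifs <;> simp [List.cons_append]]
        exact ih a (PySem.Set.add s z)

theorem pvOfList_cons {α : Type} [BEq α] [LawfulBEq α] (y : α) (l : List α) :
    PySem.Set.ofList (y :: l) = y :: PySem.Set.ofList (l.filter (fun z => !(z == y))) := by
  rw [PySem.Set.ofList_eq_foldl, PySem.Set.ofList_eq_foldl, List.foldl_cons]
  have h0 : PySem.Set.add ([] : List α) y = [y] := by
    simp [PySem.Set.add, PySem.Set.contains]
  rw [h0]
  exact pvFoldl_add_cons l y []

-- the scan is blind to dedup once an element is in the accumulator
theorem pvFoldl_ofList {α : Type} [BEq α] [LawfulBEq α] (f : α → Int) :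
    ∀ (n : Nat) (l : List α), l.length ≤ n → ∀ (m : α),
      List.foldl (pvStep f) (some m) (PySem.Set.ofList l) =
        List.foldl (pvStep f) (some m) l := by
  intro n
  induction n with
  | zero =>
      intro l hl m
      have : l = [] := by cases l <;> simp_all
      subst this
      rfl
  | succ n ih =>
      intro l hl m
      cases l with
      | nil => rfl
      | cons y t =>
          rw [pvOfList_cons, List.foldl_cons, List.foldl_cons, pvStep_some]
          have hlen : (t.filter (fun z => !(z == y))).length ≤ n := by
            have := List.length_filter_le (fun z => !(z == y)) t
            simp at hl
            omega
          rw [ih _ hlen]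
          apply pvSkip
          split_ifs with h <;> omega

-- first-argmax is invariant under first-occurrence dedup
theorem pvMax?_ofList {α : Type} [BEq α] [LawfulBEq α] (xs : List α) (f : α → Int) :
    PySem.List.max? (PySem.Set.ofList xs) f = PySem.List.max? xs f := by
  cases xs with
  | nil => rfl
  | cons y t =>
      rw [pvMax?_eq_foldl, pvMax?_eq_foldl, pvOfList_cons, List.foldl_cons, List.foldl_cons]
      show List.foldl (pvStep f) (some y) _ = List.foldl (pvStep f) (some y) t
      rw [pvFoldl_ofList f t.length _ (List.length_filter_le _ t)]
      exact pvSkip f y t y le_rfl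

-- first-argmax through a map
theorem pvMax?_map {α β : Type} (g : α → β) (key : β → Int) :
    ∀ (l : List α) (acc : Option α),
      List.foldl (pvStep key) (Option.map g acc) (l.map g) =
        Option.map g (List.foldl (pvStep (fun x => key (g x))) acc l) := by
  intro l
  induction l with
  | nil => intro acc; rfl
  | cons x t ih =>
      intro acc
      rw [List.map_cons, List.foldl_cons, List.foldl_cons,
          show pvStep key (Option.map g acc) (g x) =
            Option.map g (pvStep (fun z => key (g z)) acc x) by
              cases acc with
              | none => rfl
              | some m =>
                  simp only [Option.map_some, pvStep]
                  split_ifs <;> rfl]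
      exact ih _

-- the composite: A's max over Counter items = B's max by count, paired with its count
theorem pvMax_items_eq {xs : List (List Char)} {m : List Char}
    (hm : PySem.List.max? xs (fun c => (PySem.List.count xs c : Int)) = some m) :
    PySem.List.max? ((PySem.Set.ofList xs).map (fun k => (k, (List.count k xs : Int))))
      (fun p => p.2) = some (m, (List.count m xs : Int)) := by
  have h1 : PySem.List.max? ((PySem.Set.ofList xs).map (fun k => (k, (List.count k xs : Int))))
      (fun p => p.2)
      = Option.map (fun k => (k, (List.count k xs : Int)))
          (PySem.List.max? (PySem.Set.ofList xs) (fun k => (List.count k xs : Int))) := by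
    rw [pvMax?_eq_foldl, pvMax?_eq_foldl]
    exact pvMax?_map (fun k => (k, (List.count k xs : Int))) (fun p => p.2) _ none
  rw [h1, pvMax?_ofList]
  have hsame : PySem.List.max? xs (fun k => (List.count k xs : Int)) = some m := by
    simpa [PySem.List.count] using hm
  rw [hsame]
  rfl

-- ===== VERDICT (by name: the statement is the Claim_ definition above) =====
theorem most_frequent_trinucleotide_spec : Claim_equal_most_frequent_trinucleotide := by
  intro s _
  unfold Spec_most_frequent_trinucleotide most_frequent_trinucleotide most_frequent_trinucleotide_alt
  by_cases hsw : PySem.Chars.startswith s.toList "AUG".toList = true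
  · simp only [hsw, not_true, if_false]
    have hA := pvA_eq_chomp s.toList.length s.toList le_rfl
    simp only [hA]
    by_cases hc : pvWhileB s.toList = []
    · rw [hc]
      rfl
    · rw [if_neg hc, if_neg hc]
      rcases hmax : PySem.List.max? (pvWhileB s.toList)
          (fun c => (PySem.List.count (pvWhileB s.toList) c : Int)) with _ | m
      · exact absurd ((PySem.List.max?_eq_none_iff _ _).mp hmax) hc
      · rw [PySem.Dict.items_counter, pvMax_items_eq hmax]
        simp [PySem.List.count]
  · rw [Bool.not_eq_true] at hsw
    show (if ¬PySem.Chars.startswith s.toList "AUG".toList = true then ("Sequence must start with 'AUG'", (0:Int)) else _) = (if ¬PySem.Chars.startswith s.toList "AUG".toList = true then ("Sequence must start with 'AUG'", (0:Int)) else _)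
    rw [hsw]
    rw [if_pos (by decide : ¬false = true), if_pos (by decide : ¬false = true)]
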